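-- pv_equiv track=rewrite | github.com/starbeachlab/plotme | read.py | count_pair_outliers
-- ===== SOURCE A (Python) =====
-- def count_pair_outliers( cut, m):
--     nr = 0
--     for i in range( len(m[0])):
--         for j in range( len(m)-1 ):
--             for k in range( j+1, len(m)):
--                 if abs( m[j][i] - m[k][i] ) > cut:
--                     nr += 1
--     return nr
-- ===== SOURCE B (Python) =====
-- def count_pair_outliers(cut, m):
--     nr = 0
--     for col in zip(*m):
--         vals = sorted(col)
--         n = len(vals)
--         for i in range(n):
--             j = i + 1
--             while j < n and vals[j] - vals[i] <= cut:
--                 j += 1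
--             nr += n - j
--     return nr
-- ===== Notes on version B (the rewrite author's own statement) =====
-- stated objective: faster
-- what changed: B transposes the matrix, sorts each column once, and for each element scans forward only while partners are within cut, bulk-adding the remaining all-outlier suffix, instead of A's brute-force comparison of every row pair per column.
import Mathlib
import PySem

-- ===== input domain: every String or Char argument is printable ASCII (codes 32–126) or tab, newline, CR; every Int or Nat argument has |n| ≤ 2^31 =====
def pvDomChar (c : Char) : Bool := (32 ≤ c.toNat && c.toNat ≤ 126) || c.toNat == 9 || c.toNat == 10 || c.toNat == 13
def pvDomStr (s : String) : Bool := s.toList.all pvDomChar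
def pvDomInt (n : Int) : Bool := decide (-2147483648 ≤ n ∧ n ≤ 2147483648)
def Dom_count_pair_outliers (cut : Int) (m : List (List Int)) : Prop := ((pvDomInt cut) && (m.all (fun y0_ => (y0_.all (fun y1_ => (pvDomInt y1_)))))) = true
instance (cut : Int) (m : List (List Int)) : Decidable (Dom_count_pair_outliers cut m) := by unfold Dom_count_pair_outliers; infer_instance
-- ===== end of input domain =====

-- B replaces A's per-column all-pairs scan by sort-each-column and, per element, a
-- forward scan that stops at the first partner farther than `cut` and bulk-adds the rest.

-- ===== PORT A =====
-- Literal transliteration of A's triple loop; m[0] and m[j]/m[k] indexing is via pyGetD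
-- with a junk default — Pre_ excludes exactly the inputs where Python's indexing raises.
def count_pair_outliers (cut : Int) (m : List (List Int)) : Int :=
  (PySem.List.pyRange 0 ((PySem.List.pyGetD m 0 []).length : Int)).foldl (fun nr i =>
    (PySem.List.pyRange 0 ((m.length : Int) - 1)).foldl (fun nr j =>
      (PySem.List.pyRange (j + 1) (m.length : Int)).foldl (fun nr k =>
        if cut < |PySem.List.pyGetD (PySem.List.pyGetD m j []) i 0 -
                  PySem.List.pyGetD (PySem.List.pyGetD m k []) i 0| then nr + 1 else nr)
        nr) nr) 0

-- ===== PORT B =====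
-- zip(*m): columns 0 .. min(row lengths) - 1 (Python zip truncates to the shortest row).
def pvMinLen (m : List (List Int)) : Nat := ((m.map List.length).min?).getD 0

def pvCols (m : List (List Int)) : List (List Int) :=
  (List.range (pvMinLen m)).map (fun c => m.map (fun r => r.getD c 0))

-- the `while j < n and vals[j] - x <= cut: j += 1` loop of Source B
def pvScan (cut x : Int) (vals : List Int) (j : Nat) : Nat :=
  if h : j < vals.length ∧ vals.getD j 0 - x ≤ cut then pvScan cut x vals (j + 1) else j
termination_by vals.length - j
decreasing_by omega

def count_pair_outliers_alt (cut : Int) (m : List (List Int)) : Int :=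
  (pvCols m).foldl (fun nr col =>
    let vals := PySem.List.sorted col id
    let n := vals.length
    (List.range n).foldl (fun nr i =>
      nr + ((n : Int) - (pvScan cut (vals.getD i 0) vals (i + 1) : Int))) nr) 0

-- ===== PRECONDITION & SPEC =====
-- Exactly the inputs where Python A returns: m nonempty and every row at least as long
-- as the first row (otherwise m[0] or m[j][i]/m[k][i] raises IndexError).
def Pre_count_pair_outliers (_cut : Int) (m : List (List Int)) : Prop :=
  m ≠ [] ∧ ∀ r ∈ m, m.headI.length ≤ r.length
instance (cut : Int) (m : List (List Int)) : Decidable (Pre_count_pair_outliers cut m) := by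
  unfold Pre_count_pair_outliers; infer_instance

def pvWitness_count_pair_outliers : Int × List (List Int) := (1, [[0, 2], [3, 4]])

def Spec_count_pair_outliers (cut : Int) (m : List (List Int)) (out : Int) : Prop :=
  out = count_pair_outliers_alt cut m
instance (cut : Int) (m : List (List Int)) (out : Int) : Decidable (Spec_count_pair_outliers cut m out) := by
  unfold Spec_count_pair_outliers; infer_instance

-- ===== CLAIM (what is proved, stated in full; the proofs are below) =====
def Claim_equal_count_pair_outliers : Prop := ∀ (cut : Int) (m : List (List Int)), Dom_count_pair_outliers cut m → Pre_count_pair_outliers cut m → Spec_count_pair_outliers cut m (count_pair_outliers cut m)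

-- ===== LEMMAS AND PROOFS =====

-- the column of m at index i (what both sides actually compare pairwise)
def pvCol (m : List (List Int)) (i : Nat) : List Int := m.map (fun r => r.getD i 0)

-- number of pairs j < k with P l[j] l[k], structurally
def pcntP (P : Int → Int → Bool) : List Int → Nat
  | [] => 0
  | x :: xs => xs.countP (P x) + pcntP P xs

theorem range_sum_pcnt (P : Int → Int → Bool) (l : List Int) (init : Int) :
    (List.range l.length).foldl
      (fun nr i => nr + (((l.drop (i + 1)).countP (P (l.getD i 0)) : Nat) : Int)) init
    = init + (pcntP P l : Int) := by
  induction l generalizing init with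
  | nil => simp [pcntP]
  | cons x xs ih =>
    rw [List.length_cons, List.range_succ_eq_map, List.foldl_cons, List.foldl_map]
    simp only [List.getD_cons_succ, List.drop_succ_cons, List.getD_cons_zero]
    rw [ih]
    simp [pcntP]
    ring

-- A-side inner double loop over rows, for one fixed column index iN

theorem lemA_inner (cut : Int) (m : List (List Int)) (hm : m ≠ []) (iN : Nat) (nr : Int) :
    (PySem.List.pyRange 0 ((m.length : Int) - 1)).foldl (fun nr j =>
      (PySem.List.pyRange (j + 1) (m.length : Int)).foldl (fun nr k =>
        if cut < |PySem.List.pyGetD (PySem.List.pyGetD m j []) (iN : Int) 0 -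
                  PySem.List.pyGetD (PySem.List.pyGetD m k []) (iN : Int) 0| then nr + 1 else nr)
        nr) nr
    = nr + (pcntP (fun x y => decide (cut < |x - y|)) (pvCol m iN) : Int) := by
  -- step 1: rewrite the k-loop for every j in range
  have hstep : ∀ (nr : Int) (j : Int), j ∈ PySem.List.pyRange 0 ((m.length : Int) - 1) →
      (PySem.List.pyRange (j + 1) (m.length : Int)).foldl (fun nr k =>
        if cut < |PySem.List.pyGetD (PySem.List.pyGetD m j []) (iN : Int) 0 -
                  PySem.List.pyGetD (PySem.List.pyGetD m k []) (iN : Int) 0| then nr + 1 else nr) nr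
      = nr + (((pvCol m iN).drop (j + 1).toNat).countP
          (fun y => decide (cut < |(pvCol m iN).getD j.toNat 0 - y|)) : Int) := by
    intro nr j hj
    rw [PySem.List.mem_pyRange_one] at hj
    have h0 : (0:Int) ≤ j + 1 := by omega
    rw [PySem.List.foldl_pyRange_pyGetD' m []
      (fun nr row => if cut < |PySem.List.pyGetD (PySem.List.pyGetD m j []) (iN : Int) 0 -
                  PySem.List.pyGetD row (iN : Int) 0| then nr + 1 else nr) nr h0]
    have hc := PySem.List.foldl_count_if
      (fun row => decide (cut < |PySem.List.pyGetD (PySem.List.pyGetD m j []) (iN : Int) 0 -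
                  PySem.List.pyGetD row (iN : Int) 0|)) (m.drop (j+1).toNat) nr
    simp only [decide_eq_true_eq] at hc
    rw [hc]
    congr 1
    rw [pvCol, List.map_drop.symm, List.countP_map]
    congr 1
    apply List.countP_congr
    intro row hrow
    have hjlt : j.toNat < m.length := by omega
    have hjn : j = ((j.toNat : Nat) : Int) := (Int.toNat_of_nonneg hj.1).symm
    rw [hjn, PySem.List.pyGetD_natCast, PySem.List.pyGetD_natCast]
    have h1 : m.getD j.toNat [] = m[j.toNat] := List.getD_eq_getElem m [] hjlt
    have h2 : (List.map (fun r => r.getD iN 0) m).getD j.toNat 0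
        = (m[j.toNat]).getD iN 0 := by
      rw [List.getD_eq_getElem _ 0 (by simpa using hjlt), List.getElem_map]
    rw [h1]
    simp [Function.comp, max_eq_left hj.1,
      List.getElem?_eq_getElem hjlt]
  have hcongr := PySem.List.foldl_congr_mem
    (PySem.List.pyRange 0 ((m.length : Int) - 1))
    (fun nr j =>
      (PySem.List.pyRange (j + 1) (m.length : Int)).foldl (fun nr k =>
        if cut < |PySem.List.pyGetD (PySem.List.pyGetD m j []) (iN : Int) 0 -
                  PySem.List.pyGetD (PySem.List.pyGetD m k []) (iN : Int) 0| then nr + 1 else nr)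
        nr)
    (fun nr j => nr + (((pvCol m iN).drop (j + 1).toNat).countP
      (fun y => decide (cut < |(pvCol m iN).getD j.toNat 0 - y|)) : Int)) nr
    (fun acc x hx => hstep acc x hx)
  rw [hcongr]
  have hpos : 1 ≤ m.length := List.length_pos_of_ne_nil hm
  have hlen1 : ((m.length : Int) - 1) = ((m.length - 1 : Nat) : Int) := by omega
  rw [hlen1, PySem.List.pyRange_zero_natCast, List.foldl_map]
  have hbody : ∀ (nr : Int) (k : Nat),
      nr + (((pvCol m iN).drop (((k : Int)) + 1).toNat).countP
        (fun y => decide (cut < |(pvCol m iN).getD ((k : Int)).toNat 0 - y|)) : Int)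
      = nr + (((pvCol m iN).drop (k + 1)).countP
        (fun y => decide (cut < |(pvCol m iN).getD k 0 - y|)) : Int) := by
    intro nr k
    have h1 : (((k : Int)) + 1).toNat = k + 1 := by omega
    have h2 : ((k : Int)).toNat = k := by omega
    rw [h1, h2]
  have hcongr2 := PySem.List.foldl_congr_mem
    (List.range (m.length - 1))
    (fun nr (k : Nat) => nr + (((pvCol m iN).drop (((k : Int)) + 1).toNat).countP
      (fun y => decide (cut < |(pvCol m iN).getD ((k : Int)).toNat 0 - y|)) : Int))
    (fun nr k => nr + (((pvCol m iN).drop (k + 1)).countP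
      (fun y => decide (cut < |(pvCol m iN).getD k 0 - y|)) : Int)) nr
    (fun acc x _ => hbody acc x)
  rw [hcongr2]
  -- extend the range from m.length - 1 to m.length (the extra term is 0)
  have hext : m.length = (m.length - 1) + 1 := by omega
  have hcl : (pvCol m iN).length = m.length := by simp [pvCol]
  have hfull : (List.range m.length).foldl
      (fun nr k => nr + (((pvCol m iN).drop (k + 1)).countP
        (fun y => decide (cut < |(pvCol m iN).getD k 0 - y|)) : Int)) nr
      = (List.range (m.length - 1)).foldl
      (fun nr k => nr + (((pvCol m iN).drop (k + 1)).countP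
        (fun y => decide (cut < |(pvCol m iN).getD k 0 - y|)) : Int)) nr := by
    conv_lhs => rw [hext]
    rw [List.range_succ, List.foldl_append]
    simp only [List.foldl_cons, List.foldl_nil]
    rw [List.drop_eq_nil_of_le (by omega)]
    simp
  rw [← hfull]
  have := range_sum_pcnt (fun x y => decide (cut < |x - y|)) (pvCol m iN) nr
  rw [hcl] at this
  exact this

theorem pvScan_eq (cut x : Int) (vals : List Int) (j : Nat) :
    pvScan cut x vals j
      = j + ((vals.drop j).takeWhile (fun y => decide (y - x ≤ cut))).length := by
  rw [pvScan]
  split_ifs with h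
  · obtain ⟨hj, hle⟩ := h
    rw [pvScan_eq cut x vals (j + 1)]
    rw [List.drop_eq_getElem_cons hj]
    rw [List.takeWhile_cons_of_pos (by simpa [List.getD_eq_getElem?_getD, List.getElem?_eq_getElem hj] using hle)]
    simp [List.length_cons]
    omega
  · rcases Nat.lt_or_ge j vals.length with hj | hj
    · have : vals.getD j 0 - x ≤ cut → False := fun hc => h ⟨hj, hc⟩
      rw [List.drop_eq_getElem_cons hj]
      rw [List.takeWhile_cons_of_neg]
      · simp
      · simp only [decide_eq_true_eq]
        intro hc
        exact this (by simpa [List.getD_eq_getElem?_getD, List.getElem?_eq_getElem hj] using hc)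
    · rw [List.drop_eq_nil_of_le hj]
      simp
termination_by vals.length - j
decreasing_by omega

theorem count_tw_sorted (cut x : Int) (t : List Int) (h : t.Pairwise (· ≤ ·)) :
    t.countP (fun y => decide (cut < y - x))
      + (t.takeWhile (fun y => decide (y - x ≤ cut))).length = t.length := by
  induction t with
  | nil => simp
  | cons y ts ih =>
    rcases List.pairwise_cons.mp h with ⟨hy, hts⟩
    by_cases hc : y - x ≤ cut
    · rw [List.takeWhile_cons_of_pos (by simpa using hc)]
      simp only [List.countP_cons, List.length_cons]
      have hd : (decide (cut < y - x)) = false := by simp [not_lt.mpr hc]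
      rw [hd]
      have := ih hts
      simp only [Bool.false_eq_true, if_false]
      omega
    · rw [List.takeWhile_cons_of_neg (by simpa using hc)]
      simp only [List.countP_cons, List.length_cons, List.length_nil]
      have hall : ts.countP (fun y => decide (cut < y - x)) = ts.length := by
        rw [List.countP_eq_length]
        intro z hz
        simp only [decide_eq_true_eq]
        have := hy z hz
        omega
      have hd : (decide (cut < y - x)) = true := by simp [not_le.mp hc]
      rw [hd, hall]
      simp

theorem le_of_mem_drop (vals : List Int) (h : vals.Pairwise (· ≤ ·)) (i : Nat)
    (hi : i < vals.length) (y : Int) (hy : y ∈ vals.drop (i + 1)) :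
    vals.getD i 0 ≤ y := by
  obtain ⟨k, hk, rfl⟩ := List.mem_iff_getElem.mp hy
  rw [List.length_drop] at hk
  rw [List.getElem_drop]
  rw [List.getD_eq_getElem vals 0 hi]
  exact (List.pairwise_iff_getElem.mp h) i (i + 1 + k) hi (by omega) (by omega)

theorem lemB_vals (cut : Int) (vals : List Int) (h : vals.Pairwise (· ≤ ·)) (nr : Int) :
    (List.range vals.length).foldl (fun nr i =>
      nr + ((vals.length : Int) - (pvScan cut (vals.getD i 0) vals (i + 1) : Int))) nr
    = nr + (pcntP (fun x y => decide (cut < |x - y|)) vals : Int) := by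
  have hstep : ∀ (nr : Int) (i : Nat), i ∈ List.range vals.length →
      nr + ((vals.length : Int) - (pvScan cut (vals.getD i 0) vals (i + 1) : Int))
      = nr + (((vals.drop (i + 1)).countP
          (fun y => decide (cut < |vals.getD i 0 - y|)) : Nat) : Int) := by
    intro nr i hi
    rw [List.mem_range] at hi
    congr 1
    set x := vals.getD i 0 with hx
    set t := vals.drop (i + 1) with ht
    have hts : t.Pairwise (· ≤ ·) := h.sublist (List.drop_sublist _ _)
    have htw := count_tw_sorted cut x t hts
    have hlen : t.length = vals.length - (i + 1) := by simp [ht]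
    have hcc : t.countP (fun y => decide (cut < y - x))
        = t.countP (fun y => decide (cut < |x - y|)) := by
      apply List.countP_congr
      intro y hy
      have hxy : x ≤ y := le_of_mem_drop vals h i hi y (ht ▸ hy)
      have : |x - y| = y - x := by rw [abs_sub_comm]; exact abs_of_nonneg (by omega)
      simp [this]
    rw [pvScan_eq, ← ht, ← hcc]
    omega
  have hcongr := PySem.List.foldl_congr_mem (List.range vals.length)
    (fun nr i => nr + ((vals.length : Int) - (pvScan cut (vals.getD i 0) vals (i + 1) : Int)))
    (fun nr i => nr + (((vals.drop (i + 1)).countP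
        (fun y => decide (cut < |vals.getD i 0 - y|)) : Nat) : Int)) nr
    (fun acc x hx => hstep acc x hx)
  rw [hcongr]
  exact range_sum_pcnt (fun x y => decide (cut < |x - y|)) vals nr

theorem pcntP_perm (P : Int → Int → Bool) (hs : ∀ a b, P a b = P b a)
    {l l' : List Int} (h : l.Perm l') : pcntP P l = pcntP P l' := by
  induction h with
  | nil => rfl
  | cons x h ih => simp [pcntP, ih, h.countP_eq]
  | swap x y l =>
    simp only [pcntP, List.countP_cons]
    rw [hs y x]
    omega
  | trans h1 h2 ih1 ih2 => exact ih1.trans ih2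

theorem lemB_col (cut : Int) (c : List Int) (nr : Int) :
    (List.range (PySem.List.sorted c id).length).foldl (fun nr i =>
      nr + (((PySem.List.sorted c id).length : Int)
        - (pvScan cut ((PySem.List.sorted c id).getD i 0) (PySem.List.sorted c id) (i + 1) : Int))) nr
    = nr + (pcntP (fun x y => decide (cut < |x - y|)) c : Int) := by
  have hp : (PySem.List.sorted c id).Pairwise (· ≤ ·) := by
    simpa using PySem.List.sorted_pairwise c id
  rw [lemB_vals cut _ hp nr]
  congr 1
  have hperm := PySem.List.sorted_perm c id false
  exact congrArg _ (pcntP_perm (fun x y => decide (cut < |x - y|))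
    (fun a b => by simp only []; rw [abs_sub_comm]) hperm)

theorem pvMinLen_eq (m : List (List Int)) (hm : m ≠ [])
    (hall : ∀ r ∈ m, m.headI.length ≤ r.length) : pvMinLen m = m.headI.length := by
  have hmem : m.headI.length ∈ m.map List.length :=
    List.mem_map.mpr ⟨m.headI, List.head!_mem_self (by simpa using hm), rfl⟩
  have : (m.map List.length).min? = some m.headI.length := by
    rw [List.min?_eq_some_iff]
    refine ⟨hmem, ?_⟩
    intro b hb
    obtain ⟨r, hr, rfl⟩ := List.mem_map.mp hb
    exact hall r hr
  simp [pvMinLen, this]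

theorem main_eq (cut : Int) (m : List (List Int)) (hm : m ≠ [])
    (hall : ∀ r ∈ m, m.headI.length ≤ r.length) :
    count_pair_outliers cut m = count_pair_outliers_alt cut m := by
  have hL : (PySem.List.pyGetD m 0 []).length = m.headI.length := by
    cases m with
    | nil => exact absurd rfl hm
    | cons x xs => simp [PySem.List.pyGetD, PySem.List.pyGet?, PySem.List.pyIdx?]
  -- A-side
  have hA : count_pair_outliers cut m = (List.range m.headI.length).foldl
      (fun nr iN => nr + (pcntP (fun x y => decide (cut < |x - y|)) (pvCol m iN) : Int)) 0 := by
    unfold count_pair_outliers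
    rw [hL, PySem.List.pyRange_zero_natCast, List.foldl_map]
    exact PySem.List.foldl_congr_mem (List.range m.headI.length)
      (fun nr iN =>
        (PySem.List.pyRange 0 ((m.length : Int) - 1)).foldl (fun nr j =>
          (PySem.List.pyRange (j + 1) (m.length : Int)).foldl (fun nr k =>
            if cut < |PySem.List.pyGetD (PySem.List.pyGetD m j []) (iN : Int) 0 -
                      PySem.List.pyGetD (PySem.List.pyGetD m k []) (iN : Int) 0| then nr + 1 else nr)
            nr) nr)
      (fun nr iN => nr + (pcntP (fun x y => decide (cut < |x - y|)) (pvCol m iN) : Int)) 0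
      (fun acc iN _ => lemA_inner cut m hm iN acc)
  -- B-side
  have hB : count_pair_outliers_alt cut m = (List.range m.headI.length).foldl
      (fun nr iN => nr + (pcntP (fun x y => decide (cut < |x - y|)) (pvCol m iN) : Int)) 0 := by
    unfold count_pair_outliers_alt pvCols
    rw [pvMinLen_eq m hm hall, List.foldl_map]
    exact PySem.List.foldl_congr_mem (List.range m.headI.length)
      (fun nr c =>
        let vals := PySem.List.sorted (m.map (fun r => r.getD c 0)) id
        let n := vals.length
        (List.range n).foldl (fun nr i =>
          nr + ((n : Int) - (pvScan cut (vals.getD i 0) vals (i + 1) : Int))) nr)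
      (fun nr iN => nr + (pcntP (fun x y => decide (cut < |x - y|)) (pvCol m iN) : Int)) 0
      (fun acc c _ => lemB_col cut (m.map (fun r => r.getD c 0)) acc)
  rw [hA, hB]

-- ===== VERDICT (by name: the statement is the Claim_ definition above) =====
theorem count_pair_outliers_spec : Claim_equal_count_pair_outliers := by
  intro cut m _ hpre
  unfold Spec_count_pair_outliers
  exact main_eq cut m hpre.1 hpre.2
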